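-- pv_equiv track=rewrite | github.com/pearmnw/Y-3-Projects | Numerical Method Homework 1/Source code/IEEE_to_floating.py | convertE
-- ===== SOURCE A (Python) =====
-- def convert(string):
--     list1=[]
--     list1[:0]=string
--     return list1
--
-- def convertE(e):
--     listofe = convert(e)
--     total = 0
--     keepposof1 = []
--     #TODO: find the position that being '1'
--     for i in range(len(listofe)):
--         if(listofe[i] == '1'):
--             #first position is on the right side
--             keepposof1.append((len(listofe)-1)-i)
--     #TODO: do summation
--     for y in keepposof1:
--         total += 2**y
--     total = total - 127
--     return total
-- ===== SOURCE B (Python) =====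
-- def convertE(e):
--     total = 0
--     for c in e:
--         total = total * 2 + (1 if c == '1' else 0)
--     return total - 127
-- ===== Notes on version B (the rewrite author's own statement) =====
-- stated objective: simpler
-- what changed: Replaces the two-pass position-collection-and-power-summation with a single left-to-right Horner's-rule accumulation (total = total*2 + bit), computing no positions and no explicit powers of two.
import Mathlib
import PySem

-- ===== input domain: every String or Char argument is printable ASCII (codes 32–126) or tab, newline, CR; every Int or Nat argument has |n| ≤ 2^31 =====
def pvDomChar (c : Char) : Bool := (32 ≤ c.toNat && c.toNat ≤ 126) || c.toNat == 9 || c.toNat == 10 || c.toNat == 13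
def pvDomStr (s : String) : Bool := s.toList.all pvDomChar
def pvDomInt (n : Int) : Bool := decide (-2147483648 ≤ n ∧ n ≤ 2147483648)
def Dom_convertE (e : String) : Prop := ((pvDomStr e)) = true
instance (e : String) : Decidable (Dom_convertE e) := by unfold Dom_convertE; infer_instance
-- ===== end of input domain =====

-- B replaces A's two passes (collect '1' positions, then sum powers of two) by a single
-- Horner's-rule fold; objective: simpler.

-- ===== PORT A =====
-- convert(string) turns the string into its list of characters
def convertA (string : String) : List Char := string.toList

def convertE (e : String) : Int :=
  let listofe := convertA e
  -- first loop: collect positions of '1', counted from the right (indices are in range)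
  let keepposof1 : List Nat :=
    (List.range listofe.length).foldl
      (fun acc i => if listofe.getD i ' ' = '1' then acc ++ [(listofe.length - 1) - i] else acc) []
  -- second loop: total += 2**y
  let total : Int := keepposof1.foldl (fun t y => t + 2 ^ y) 0
  total - 127

-- ===== PORT B =====
def convertE_alt (e : String) : Int :=
  (e.toList.foldl (fun t c => t * 2 + if c = '1' then 1 else 0) 0) - 127

-- ===== PRECONDITION & SPEC =====
def Spec_convertE (e : String) (out : Int) : Prop := out = convertE_alt e
instance (e : String) (out : Int) : Decidable (Spec_convertE e out) := by unfold Spec_convertE; infer_instance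

-- ===== CLAIM (what is proved, stated in full; the proofs are below) =====
def Claim_equal_convertE : Prop := ∀ (e : String), Dom_convertE e → Spec_convertE e (convertE e)

-- ===== LEMMAS AND PROOFS =====

-- the binary value of a character list (non-'1' chars count as 0, like both programs)
def pvBits : List Char → Int
  | [] => 0
  | c :: t => (if c = '1' then 2 ^ t.length else 0) + pvBits t

-- the list of right-counted positions of '1' that A's first loop produces
def pvPos : List Char → List Nat
  | [] => []
  | c :: t => (if c = '1' then [t.length] else []) ++ pvPos t

theorem pvFoldl_congr {α β : Type} (l : List α) (f g : β → α → β) (a : β)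
    (h : ∀ b x, x ∈ l → f b x = g b x) : l.foldl f a = l.foldl g a := by
  induction l generalizing a with
  | nil => rfl
  | cons x t ih =>
      rw [List.foldl_cons, List.foldl_cons, h a x (List.mem_cons_self),
        ih (g a x) (fun b y hy => h b y (List.mem_cons_of_mem _ hy))]

theorem pvKeep_gen (l : List Char) (acc : List Nat) :
    (List.range l.length).foldl
      (fun acc i => if l.getD i ' ' = '1' then acc ++ [(l.length - 1) - i] else acc) acc
      = acc ++ pvPos l := by
  induction l generalizing acc with
  | nil => simp [pvPos]
  | cons c t ih =>
      rw [List.length_cons, List.range_succ_eq_map, List.foldl_cons, List.foldl_map]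
      have hshift : ∀ (b : List Nat) (i : Nat), i ∈ List.range t.length →
          (if (c :: t).getD (i + 1) ' ' = '1' then b ++ [(t.length + 1 - 1) - (i + 1)] else b)
            = (if t.getD i ' ' = '1' then b ++ [(t.length - 1) - i] else b) := by
        intro b i _
        rw [List.getD_cons_succ]
        have h2 : (t.length + 1 - 1) - (i + 1) = (t.length - 1) - i := by omega
        rw [h2]
      rw [pvFoldl_congr _ _ _ _ hshift, ih]
      rw [List.getD_cons_zero]
      by_cases hc : c = '1'
      · rw [if_pos hc]
        show (acc ++ [t.length + 1 - 1 - 0]) ++ pvPos t = acc ++ pvPos (c :: t)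
        rw [pvPos, hc, if_pos rfl, List.append_assoc]
        norm_num
      · rw [if_neg hc]
        rw [pvPos, if_neg hc, List.nil_append]

theorem pvSum_gen (l : List Nat) (a : Int) :
    l.foldl (fun t y => t + 2 ^ y) a = a + l.foldl (fun t y => t + 2 ^ y) 0 := by
  induction l generalizing a with
  | nil => simp
  | cons x t ih =>
      rw [List.foldl_cons, List.foldl_cons, ih (a + 2 ^ x), ih (0 + 2 ^ x)]
      ring

theorem pvPos_sum (l : List Char) :
    (pvPos l).foldl (fun t y => t + 2 ^ y) 0 = pvBits l := by
  induction l with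
  | nil => simp [pvPos, pvBits]
  | cons c t ih =>
      by_cases hc : c = '1'
      · rw [pvPos, pvBits, hc, if_pos rfl, if_pos rfl, List.singleton_append,
          List.foldl_cons, pvSum_gen, ih]
        ring
      · simp [pvPos, pvBits, hc, ih]

theorem pvHorner_gen (l : List Char) (a : Int) :
    l.foldl (fun t c => t * 2 + if c = '1' then 1 else 0) a = a * 2 ^ l.length + pvBits l := by
  induction l generalizing a with
  | nil => simp [pvBits]
  | cons c t ih =>
      rw [List.foldl_cons, ih, pvBits, List.length_cons]
      by_cases hc : c = '1' <;> simp [hc] <;> ring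

-- ===== VERDICT (by name: the statement is the Claim_ definition above) =====
theorem convertE_spec : Claim_equal_convertE := by
  intro e _
  show convertE e = convertE_alt e
  simp only [convertE, convertE_alt, convertA]
  rw [pvKeep_gen, List.nil_append, pvPos_sum, pvHorner_gen]
  simp
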